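-- pv_equiv track=rewrite | github.com/YuriiReshetnyk/algorithms_labs | main.py | count_possible_pairs
-- ===== SOURCE A (Python) =====
-- def sort_by_tribes(pairs):
--
--     found_tribe = -1
--     tribes = []
--
--     for pair in pairs:
--         human1, human2 = pair
--         if not tribes:
--             tribes.append([human1, human2])
--         else:
--             for tribe in tribes:
--                 if human1 in tribe:
--                     tribe.append(human2)
--                     found_tribe = 1
--                 elif human2 in tribe:
--                     tribe.append(human1)
--                     found_tribe = 1
--
--             if found_tribe == -1:
--                 tribes.append([human1, human2])
--         found_tribe = -1
--
--     return tribes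
--
-- def count_possible_pairs(pairs):
--
--     count = 0
--
--     tribes = sort_by_tribes(pairs)
--     boys = {}
--     girls = {}
--     for tribe in tribes:
--         tribe_index = tribes.index(tribe)
--         boys[tribe_index] = 0
--         girls[tribe_index] = 0
--         for human in tribe:
--             if human % 2 == 0:
--                 boys[tribe_index] += 1
--             else:
--                 girls[tribe_index] += 1
--
--     for i in range(len(tribes) - 1):
--         for j in range(i + 1, len(tribes)):
--             count += boys[i]*girls[j] + boys[j]*girls[i]
--
--     return count
-- ===== SOURCE B (Python) =====
-- def count_possible_pairs(pairs):
--     # group into tribes (same union rule as the task: scan all tribes, append the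
--     # partner to every tribe already containing one member of the pair)
--     tribes = []
--     for human1, human2 in pairs:
--         if not tribes:
--             tribes.append([human1, human2])
--         else:
--             matched = False
--             for tribe in tribes:
--                 if human1 in tribe:
--                     tribe.append(human2)
--                     matched = True
--                 elif human2 in tribe:
--                     tribe.append(human1)
--                     matched = True
--             if not matched:
--                 tribes.append([human1, human2])
--
--     # one pass: cross boy-girl pairs over distinct tribes = B_total*G_total - sum(b_i*g_i)
--     total_boys = 0
--     total_girls = 0
--     same_tribe = 0
--     for tribe in tribes:
--         b = sum(1 for human in tribe if human % 2 == 0)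
--         g = len(tribe) - b
--         total_boys += b
--         total_girls += g
--         same_tribe += b * g
--     return total_boys * total_girls - same_tribe
-- ===== Notes on version B (the rewrite author's own statement) =====
-- stated objective: alternative
-- what changed: The O(T^2) double loop over tribe pairs (with dicts keyed by tribes.index, an extra O(T^2) scan) is replaced by one pass per tribe using the identity sum_{i<j}(b_i g_j + b_j g_i) = B_total*G_total - sum_i b_i g_i.
import Mathlib
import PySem

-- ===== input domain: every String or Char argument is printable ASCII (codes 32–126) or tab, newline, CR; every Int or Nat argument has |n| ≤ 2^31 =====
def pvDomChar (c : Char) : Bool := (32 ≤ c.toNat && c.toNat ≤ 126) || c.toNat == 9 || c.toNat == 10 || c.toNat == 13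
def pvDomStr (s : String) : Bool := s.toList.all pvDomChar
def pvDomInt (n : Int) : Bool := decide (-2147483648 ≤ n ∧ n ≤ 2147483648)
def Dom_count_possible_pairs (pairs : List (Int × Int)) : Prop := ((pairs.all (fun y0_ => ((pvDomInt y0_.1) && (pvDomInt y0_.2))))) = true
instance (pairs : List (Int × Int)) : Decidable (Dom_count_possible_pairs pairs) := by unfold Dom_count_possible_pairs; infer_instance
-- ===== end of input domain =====

-- B replaces A's O(T^2) double loop over tribe pairs (and its dicts keyed by tribes.index)
-- with a single pass using B_total*G_total - sum(b_i*g_i); the tribe grouping itself is unchanged.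

-- ===== PORT A =====
-- inner 'for tribe in tribes' loop of sort_by_tribes (tribe.append is a rebuild of the list)
def pvInnerA (human1 human2 : Int) (acc : List (List Int) × Int) (tribe : List Int) :
    List (List Int) × Int :=
  if human1 ∈ tribe then (acc.1 ++ [tribe ++ [human2]], 1)
  else if human2 ∈ tribe then (acc.1 ++ [tribe ++ [human1]], 1)
  else (acc.1 ++ [tribe], acc.2)

def sort_by_tribes (pairs : List (Int × Int)) : List (List Int) :=
  (pairs.foldl (fun (st : Int × List (List Int)) pair =>
      -- st = (found_tribe, tribes); found_tribe is reset to -1 at the end of each iteration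
      if st.2 = [] then (-1, st.2 ++ [[pair.1, pair.2]])
      else
        let r := st.2.foldl (pvInnerA pair.1 pair.2) ([], st.1)
        if r.2 = -1 then (-1, r.1 ++ [[pair.1, pair.2]]) else (-1, r.1))
    (-1, [])).2

-- body of 'for human in tribe' updating the boys/girls dicts at key tribe_index
def pvDictStep (tribe_index : Int) (bg : PySem.Dict Int Int × PySem.Dict Int Int) (human : Int) :
    PySem.Dict Int Int × PySem.Dict Int Int :=
  if PySem.Int.mod human 2 = 0 then
    (bg.1.insert tribe_index (bg.1.getD tribe_index 0 + 1), bg.2)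
  else
    (bg.1, bg.2.insert tribe_index (bg.2.getD tribe_index 0 + 1))

def count_possible_pairs (pairs : List (Int × Int)) : Int :=
  let tribes := sort_by_tribes pairs
  let bg := tribes.foldl (fun (bg : PySem.Dict Int Int × PySem.Dict Int Int) tribe =>
      -- tribes.index(tribe): tribe is always a member, so the 0 default is never taken
      let tribe_index : Int := (((PySem.List.index? tribes tribe).getD 0 : Nat) : Int)
      tribe.foldl (pvDictStep tribe_index) (bg.1.insert tribe_index 0, bg.2.insert tribe_index 0))
    (PySem.Dict.empty, PySem.Dict.empty)
  (PySem.List.pyRange 0 (PySem.List.len tribes - 1) 1).foldl (fun count i =>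
    (PySem.List.pyRange (i + 1) (PySem.List.len tribes) 1).foldl (fun count j =>
      count + bg.1.getD i 0 * bg.2.getD j 0 + bg.1.getD j 0 * bg.2.getD i 0) count) 0

-- ===== PORT B =====
-- inner 'for tribe in tribes' loop of B's grouping pass (Bool 'matched' flag)
def pvInnerB (human1 human2 : Int) (acc : List (List Int) × Bool) (tribe : List Int) :
    List (List Int) × Bool :=
  if human1 ∈ tribe then (acc.1 ++ [tribe ++ [human2]], true)
  else if human2 ∈ tribe then (acc.1 ++ [tribe ++ [human1]], true)
  else (acc.1 ++ [tribe], acc.2)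

def pvGroupB (pairs : List (Int × Int)) : List (List Int) :=
  pairs.foldl (fun tribes pair =>
    if tribes = [] then tribes ++ [[pair.1, pair.2]]
    else
      let r := tribes.foldl (pvInnerB pair.1 pair.2) ([], false)
      if r.2 then r.1 else r.1 ++ [[pair.1, pair.2]]) []

def count_possible_pairs_alt (pairs : List (Int × Int)) : Int :=
  let tribes := pvGroupB pairs
  let s := tribes.foldl (fun (acc : Int × Int × Int) tribe =>
      let b : Int := (tribe.countP (fun human => PySem.Int.mod human 2 == 0) : Int)
      let g : Int := PySem.List.len tribe - b
      (acc.1 + b, acc.2.1 + g, acc.2.2 + b * g)) (0, 0, 0)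
  s.1 * s.2.1 - s.2.2

-- ===== PRECONDITION & SPEC =====
def Spec_count_possible_pairs (pairs : List (Int × Int)) (out : Int) : Prop := out = count_possible_pairs_alt pairs
instance (pairs : List (Int × Int)) (out : Int) : Decidable (Spec_count_possible_pairs pairs out) := by unfold Spec_count_possible_pairs; infer_instance

-- ===== CLAIM (what is proved, stated in full; the proofs are below) =====
def Claim_equal_count_possible_pairs : Prop := ∀ (pairs : List (Int × Int)), Dom_count_possible_pairs pairs → Spec_count_possible_pairs pairs (count_possible_pairs pairs)

-- ===== LEMMAS AND PROOFS =====

-- boy / girl counts of one tribe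
def pvB (t : List Int) : Int := (t.countP (fun h => PySem.Int.mod h 2 == 0) : Int)
def pvG (t : List Int) : Int := (t.countP (fun h => !(PySem.Int.mod h 2 == 0)) : Int)

-- how one pair transforms an existing tribe, and whether it matches it
def pvApply (h1 h2 : Int) (t : List Int) : List Int :=
  if h1 ∈ t then t ++ [h2] else if h2 ∈ t then t ++ [h1] else t
def pvHit (h1 h2 : Int) (t : List Int) : Bool := decide (h1 ∈ t) || decide (h2 ∈ t)

lemma innerB_spec (h1 h2 : Int) (ts : List (List Int)) :
    ∀ (acc : List (List Int)) (fl : Bool),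
      ts.foldl (pvInnerB h1 h2) (acc, fl) =
        (acc ++ ts.map (pvApply h1 h2), fl || ts.any (pvHit h1 h2)) := by
  induction ts with
  | nil => intro acc fl; simp
  | cons t ts ih =>
    intro acc fl
    rw [List.foldl_cons]
    by_cases hm1 : h1 ∈ t
    · simp [pvInnerB, pvApply, pvHit, hm1, ih]
    · by_cases hm2 : h2 ∈ t
      · simp [pvInnerB, pvApply, pvHit, hm1, hm2, ih]
      · simp [pvInnerB, pvApply, pvHit, hm1, hm2, ih]

lemma innerA_spec (h1 h2 : Int) (ts : List (List Int)) :
    ∀ (acc : List (List Int)) (fl : Bool),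
      ts.foldl (pvInnerA h1 h2) (acc, if fl then 1 else -1) =
        (acc ++ ts.map (pvApply h1 h2), if fl || ts.any (pvHit h1 h2) then 1 else -1) := by
  induction ts with
  | nil => intro acc fl; simp
  | cons t ts ih =>
    intro acc fl
    rw [List.foldl_cons]
    by_cases hm1 : h1 ∈ t
    · have := ih (acc ++ [t ++ [h2]]) true
      simp only [if_pos] at this
      simp [pvInnerA, pvApply, pvHit, hm1, this]
    · by_cases hm2 : h2 ∈ t
      · have := ih (acc ++ [t ++ [h1]]) true
        simp only [if_pos] at this
        simp [pvInnerA, pvApply, pvHit, hm1, hm2, this]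
      · simp [pvInnerA, pvApply, pvHit, hm1, hm2, ih]

-- B's grouping step, closed form (the empty case coincides with the unmatched case)
lemma groupB_step (tribes : List (List Int)) (pair : Int × Int) :
    (if tribes = [] then tribes ++ [[pair.1, pair.2]]
     else
       let r := tribes.foldl (pvInnerB pair.1 pair.2) ([], false)
       if r.2 then r.1 else r.1 ++ [[pair.1, pair.2]]) =
    (if tribes.any (pvHit pair.1 pair.2) then tribes.map (pvApply pair.1 pair.2)
     else tribes.map (pvApply pair.1 pair.2) ++ [[pair.1, pair.2]]) := by
  by_cases ht : tribes = []
  · simp [ht]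
  · have h := innerB_spec pair.1 pair.2 tribes [] false
    simp only [Bool.false_or, List.nil_append] at h
    simp only [ht, if_false, h]

-- the two groupings agree
lemma sort_eq_groupB (pairs : List (Int × Int)) : sort_by_tribes pairs = pvGroupB pairs := by
  unfold sort_by_tribes pvGroupB
  suffices h : ∀ (ps : List (Int × Int)) (X : List (List Int)),
      (ps.foldl (fun (st : Int × List (List Int)) pair =>
        if st.2 = [] then (-1, st.2 ++ [[pair.1, pair.2]])
        else
          let r := st.2.foldl (pvInnerA pair.1 pair.2) ([], st.1)
          if r.2 = -1 then (-1, r.1 ++ [[pair.1, pair.2]]) else (-1, r.1)) (-1, X)).2 =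
      ps.foldl (fun tribes pair =>
        if tribes = [] then tribes ++ [[pair.1, pair.2]]
        else
          let r := tribes.foldl (pvInnerB pair.1 pair.2) ([], false)
          if r.2 then r.1 else r.1 ++ [[pair.1, pair.2]]) X by
    exact h pairs []
  intro ps
  induction ps with
  | nil => intro X; rfl
  | cons p ps ih =>
    intro X
    rw [List.foldl_cons, List.foldl_cons]
    by_cases hX : X = []
    · simpa [hX] using ih _
    · have hA := innerA_spec p.1 p.2 X [] false
      have hB := innerB_spec p.1 p.2 X [] false
      simp only [Bool.false_or, if_neg (Bool.false_ne_true)] at hA hB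
      by_cases hany : X.any (pvHit p.1 p.2) = true
      · simp only [hX, hA, hB, hany, if_pos, List.nil_append]
        simpa using ih _
      · simp only [hX, hA, hB, Bool.not_eq_true] at *
        simp only [hany, List.nil_append]
        simpa using ih _

-- invariant: tribes are nonempty with pairwise distinct heads
def pvInv (ts : List (List Int)) : Prop :=
  ts.Pairwise (fun s t => s.head? ≠ t.head?) ∧ ∀ t ∈ ts, t ≠ []

lemma pvApply_head? (h1 h2 : Int) (t : List Int) (ht : t ≠ []) :
    (pvApply h1 h2 t).head? = t.head? := by
  obtain ⟨a, rest, rfl⟩ := List.exists_cons_of_ne_nil ht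
  unfold pvApply
  split <;> try split
  all_goals simp

lemma pvApply_ne_nil (h1 h2 : Int) (t : List Int) (ht : t ≠ []) : pvApply h1 h2 t ≠ [] := by
  obtain ⟨a, rest, rfl⟩ := List.exists_cons_of_ne_nil ht
  unfold pvApply
  split <;> try split
  all_goals simp

lemma inv_groupB (pairs : List (Int × Int)) : pvInv (pvGroupB pairs) := by
  unfold pvGroupB
  suffices h : ∀ (ps : List (Int × Int)) (X : List (List Int)), pvInv X →
      pvInv (ps.foldl (fun tribes pair =>
        if tribes = [] then tribes ++ [[pair.1, pair.2]]
        else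
          let r := tribes.foldl (pvInnerB pair.1 pair.2) ([], false)
          if r.2 then r.1 else r.1 ++ [[pair.1, pair.2]]) X) by
    exact h pairs [] ⟨List.Pairwise.nil, by simp⟩
  intro ps
  induction ps with
  | nil => intro X hX; exact hX
  | cons p ps ih =>
    intro X hX
    rw [List.foldl_cons]
    refine ih _ ?_
    rw [groupB_step X p]
    have hmap : pvInv (X.map (pvApply p.1 p.2)) := by
      constructor
      · rw [List.pairwise_map]
        refine hX.1.imp_of_mem ?_
        intro s t hs ht hne
        rwa [pvApply_head? p.1 p.2 s (hX.2 s hs), pvApply_head? p.1 p.2 t (hX.2 t ht)]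
      · intro t ht
        rcases List.mem_map.mp ht with ⟨u, hu, rfl⟩
        exact pvApply_ne_nil p.1 p.2 u (hX.2 u hu)
    by_cases hany : X.any (pvHit p.1 p.2) = true
    · simpa [hany] using hmap
    · simp only [hany, Bool.false_eq_true, if_false]
      constructor
      · rw [List.pairwise_append]
        refine ⟨hmap.1, by simp, ?_⟩
        intro s hs u hu
        rcases List.mem_map.mp hs with ⟨v, hv, rfl⟩
        have hvne : v ≠ [] := hX.2 v hv
        have hnh : ¬ pvHit p.1 p.2 v = true := by
          intro hhit
          exact hany (List.any_eq_true.mpr ⟨v, hv, hhit⟩)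
        have h1v : p.1 ∉ v := by
          intro hm; exact hnh (by simp [pvHit, hm])
        rw [List.mem_singleton] at hu; subst hu
        rw [pvApply_head? p.1 p.2 v hvne]
        obtain ⟨a, rest, rfl⟩ := List.exists_cons_of_ne_nil hvne
        simp only [List.head?_cons, ne_eq, Option.some.injEq]
        intro hcontra
        exact h1v (hcontra ▸ List.mem_cons_self)
      · intro t ht
        rcases List.mem_append.mp ht with h | h
        · rcases List.mem_map.mp h with ⟨u, hu, rfl⟩
          exact pvApply_ne_nil p.1 p.2 u (hX.2 u hu)
        · rw [List.mem_singleton] at h; subst h; simp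

lemma nodup_groupB (pairs : List (Int × Int)) : (pvGroupB pairs).Nodup := by
  have h := inv_groupB pairs
  exact h.1.imp (fun {s t} hne => fun heq => hne (heq ▸ rfl))

-- a fold whose body looks its element up with index? is a fold over enumerate (Nodup list)
lemma fold_idx {α : Type} (F : α → Int → List Int → α) (full : List (List Int))
    (hnd : full.Nodup) :
    ∀ (suf pre : List (List Int)) (s : α), full = pre ++ suf →
      suf.foldl (fun st t => F st (((PySem.List.index? full t).getD 0 : Nat) : Int) t) s =
        (PySem.List.enumerate suf (pre.length : Int)).foldl (fun st p => F st p.1 p.2) s := by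
  intro suf
  induction suf with
  | nil => intro pre s _; simp [PySem.List.enumerate]
  | cons t suf ih =>
    intro pre s hfull
    have hidx : PySem.List.index? full t = some pre.length := by
      rw [PySem.List.index?_eq_some_iff]
      refine ⟨pre, suf, hfull, rfl, ?_⟩
      intro hmem
      have hd := List.disjoint_of_nodup_append (hfull ▸ hnd)
      exact hd hmem List.mem_cons_self
    rw [List.foldl_cons, PySem.List.enumerate_cons, List.foldl_cons]
    simp only [hidx, Option.getD_some]
    have := ih (pre ++ [t]) (F s (pre.length : Int) t) (by rw [hfull]; simp)
    simpa [Int.add_comm] using this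

lemma pvB_cons_even {h : Int} (he : PySem.Int.mod h 2 = 0) (t : List Int) :
    pvB (h :: t) = pvB t + 1 := by
  have ht : (PySem.Int.mod h 2 == 0) = true := beq_iff_eq.mpr he
  simp only [pvB, List.countP_cons, ht, if_true]
  push_cast
  ring

lemma pvB_cons_odd {h : Int} (he : ¬ PySem.Int.mod h 2 = 0) (t : List Int) :
    pvB (h :: t) = pvB t := by
  have hf : (PySem.Int.mod h 2 == 0) = false := beq_eq_false_iff_ne.mpr he
  simp only [pvB, List.countP_cons, hf]
  norm_num

lemma pvG_cons_even {h : Int} (he : PySem.Int.mod h 2 = 0) (t : List Int) :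
    pvG (h :: t) = pvG t := by
  have hf : (!(PySem.Int.mod h 2 == 0)) = false := by
    rw [beq_iff_eq.mpr he]
    rfl
  simp only [pvG, List.countP_cons, hf]
  norm_num

lemma pvG_cons_odd {h : Int} (he : ¬ PySem.Int.mod h 2 = 0) (t : List Int) :
    pvG (h :: t) = pvG t + 1 := by
  have ht : (!(PySem.Int.mod h 2 == 0)) = true := by
    rw [beq_eq_false_iff_ne.mpr he]
    rfl
  simp only [pvG, List.countP_cons, ht, if_true]
  push_cast
  ring


-- processing one tribe only touches key i of each dict
lemma tribe_getD (i : Int) (t : List Int) :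
    ∀ (b g : PySem.Dict Int Int) (x y : Int) (j : Int),
      ((t.foldl (pvDictStep i) (b.insert i x, g.insert i y)).1.getD j 0 =
        if j = i then x + pvB t else b.getD j 0) ∧
      ((t.foldl (pvDictStep i) (b.insert i x, g.insert i y)).2.getD j 0 =
        if j = i then y + pvG t else g.getD j 0) := by
  induction t with
  | nil =>
    intro b g x y j
    constructor <;>
      · rw [List.foldl_nil]
        rw [PySem.Dict.getD_insert]
        split <;> simp [pvB, pvG]
  | cons h t ih =>
    intro b g x y j
    rw [List.foldl_cons]
    by_cases he : PySem.Int.mod h 2 = 0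
    · simp only [pvDictStep, he, if_pos, PySem.Dict.getD_insert_self]
      rcases ih (b.insert i x) g (x + 1) y j with ⟨h1, h2⟩
      constructor
      · rw [h1]
        split
        · rw [pvB_cons_even he]; ring
        · next hne => rw [PySem.Dict.getD_insert, if_neg hne]
      · rw [h2]
        split
        · rw [pvG_cons_even he]
        · rfl
    · simp only [pvDictStep, he, if_false, PySem.Dict.getD_insert_self]
      rcases ih b (g.insert i y) x (y + 1) j with ⟨h1, h2⟩
      constructor
      · rw [h1]
        split
        · rw [pvB_cons_odd he]
        · rfl
      · rw [h2]
        split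
        · rw [pvG_cons_odd he]; ring
        · next hne => rw [PySem.Dict.getD_insert, if_neg hne]

-- the whole dict-building fold, described by getD
lemma enum_getD (suf : List (List Int)) :
    ∀ (k : Nat) (b g : PySem.Dict Int Int) (j : Int),
      (((PySem.List.enumerate suf (k : Int)).foldl
          (fun (bg : PySem.Dict Int Int × PySem.Dict Int Int) p =>
            p.2.foldl (pvDictStep p.1) (bg.1.insert p.1 0, bg.2.insert p.1 0)) (b, g)).1.getD j 0 =
        if (k : Int) ≤ j ∧ j < (k : Int) + suf.length then (suf.map pvB).getD (j.toNat - k) 0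
        else b.getD j 0) ∧
      (((PySem.List.enumerate suf (k : Int)).foldl
          (fun (bg : PySem.Dict Int Int × PySem.Dict Int Int) p =>
            p.2.foldl (pvDictStep p.1) (bg.1.insert p.1 0, bg.2.insert p.1 0)) (b, g)).2.getD j 0 =
        if (k : Int) ≤ j ∧ j < (k : Int) + suf.length then (suf.map pvG).getD (j.toNat - k) 0
        else g.getD j 0) := by
  induction suf with
  | nil =>
    intro k b g j
    constructor <;>
      · simp only [PySem.List.enumerate, List.foldl_nil, List.length_nil, Nat.cast_zero]
        rw [if_neg (by omega)]
  | cons t suf ih =>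
    intro k b g j
    rw [PySem.List.enumerate_cons, List.foldl_cons]
    simp only [List.length_cons, Nat.cast_add, Nat.cast_one]
    have hS := tribe_getD (k : Int) t b g 0 0 j
    have key := ih (k + 1) (t.foldl (pvDictStep (k : Int)) (b.insert (k : Int) 0, g.insert (k : Int) 0)).1
      (t.foldl (pvDictStep (k : Int)) (b.insert (k : Int) 0, g.insert (k : Int) 0)).2 j
    push_cast at key
    simp only [Prod.mk.eta] at key
    rcases key with ⟨k1, k2⟩
    constructor
    · rw [k1]
      by_cases hj1 : (k : Int) + 1 ≤ j ∧ j < (k : Int) + 1 + suf.length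
      · rw [if_pos hj1, if_pos (by omega)]
        have hge : k + 1 ≤ j.toNat := by omega
        have : j.toNat - k = (j.toNat - (k + 1)) + 1 := by omega
        rw [this]
        simp
      · rw [if_neg hj1, hS.1]
        by_cases hjk : j = (k : Int)
        · rw [if_pos hjk, if_pos (by omega)]
          have : j.toNat - k = 0 := by omega
          rw [this]
          simp
        · rw [if_neg hjk, if_neg (by omega)]
    · rw [k2]
      by_cases hj1 : (k : Int) + 1 ≤ j ∧ j < (k : Int) + 1 + suf.length
      · rw [if_pos hj1, if_pos (by omega)]
        have : j.toNat - k = (j.toNat - (k + 1)) + 1 := by omega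
        rw [this]
        simp
      · rw [if_neg hj1, hS.2]
        by_cases hjk : j = (k : Int)
        · rw [if_pos hjk, if_pos (by omega)]
          have : j.toNat - k = 0 := by omega
          rw [this]
          simp
        · rw [if_neg hjk, if_neg (by omega)]

-- the algebraic identity behind B
lemma key_ident (b g : Nat → Int) (n : Nat) :
    ∑ p ∈ Finset.range n, ∑ q ∈ Finset.Ico (p + 1) n, (b p * g q + b q * g p) =
      (∑ p ∈ Finset.range n, b p) * (∑ p ∈ Finset.range n, g p) -
        ∑ p ∈ Finset.range n, b p * g p := by
  induction n with
  | zero => simp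
  | succ n ih =>
    have houter : ∀ p ∈ Finset.range n,
        ∑ q ∈ Finset.Ico (p + 1) (n + 1), (b p * g q + b q * g p) =
          (∑ q ∈ Finset.Ico (p + 1) n, (b p * g q + b q * g p)) + (b p * g n + b n * g p) := by
      intro p hp
      rw [Finset.mem_range] at hp
      exact Finset.sum_Ico_succ_top (by omega) _
    rw [Finset.sum_range_succ, Finset.Ico_self, Finset.sum_empty, add_zero,
      Finset.sum_congr rfl houter, Finset.sum_add_distrib, ih]
    rw [Finset.sum_range_succ (f := b), Finset.sum_range_succ (f := g),
      Finset.sum_range_succ (f := fun p => b p * g p)]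
    have h1 : ∑ p ∈ Finset.range n, (b p * g n + b n * g p) =
        (∑ p ∈ Finset.range n, b p) * g n + b n * ∑ p ∈ Finset.range n, g p := by
      rw [Finset.sum_add_distrib, ← Finset.sum_mul, ← Finset.mul_sum]
    rw [h1]
    ring

-- sum of getD over all positions is the list sum
lemma sum_getD (l : List Int) : ∑ p ∈ Finset.range l.length, l.getD p 0 = l.sum := by
  induction l with
  | nil => simp
  | cons x l ih =>
    rw [List.length_cons, Finset.sum_range_succ']
    simp only [List.getD_cons_succ, List.getD_cons_zero, ih, List.sum_cons]
    ring

lemma pvLenG (t : List Int) : PySem.List.len t - pvB t = pvG t := by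
  have h := List.length_eq_countP_add_countP (p := fun h => PySem.Int.mod h 2 == 0) (l := t)
  have h2 : t.countP (fun a => !(PySem.Int.mod a 2 == 0)) =
      t.countP (fun a => decide ¬((fun h => PySem.Int.mod h 2 == 0) a = true)) := by
    apply List.countP_congr
    intro a _
    simp
  simp only [pvB, pvG, PySem.List.len_eq, h2]
  omega

lemma b_fold (tribes : List (List Int)) :
    ∀ (a b c : Int),
      tribes.foldl (fun (acc : Int × Int × Int) tribe =>
        let bb : Int := (tribe.countP (fun human => PySem.Int.mod human 2 == 0) : Int)
        let gg : Int := PySem.List.len tribe - bb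
        (acc.1 + bb, acc.2.1 + gg, acc.2.2 + bb * gg)) (a, b, c) =
      (a + (tribes.map pvB).sum, b + (tribes.map pvG).sum,
        c + (tribes.map (fun t => pvB t * pvG t)).sum) := by
  induction tribes with
  | nil => intro a b c; simp
  | cons t ts ih =>
    intro a b c
    rw [List.foldl_cons]
    have hbody : (let bb : Int := (t.countP (fun human => PySem.Int.mod human 2 == 0) : Int)
        let gg : Int := PySem.List.len t - bb
        ((a, b, c).1 + bb, (a, b, c).2.1 + gg, (a, b, c).2.2 + bb * gg)) =
        (a + pvB t, b + pvG t, c + pvB t * pvG t) := by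
      rw [← pvLenG t]
      rfl
    rw [hbody, ih]
    simp only [List.map_cons, List.sum_cons]
    refine Prod.ext ?_ (Prod.ext ?_ ?_) <;> dsimp <;> ring

lemma sum_map_pyRange (f : Int → Int) (a b : Int) :
    ((PySem.List.pyRange a b 1).map f).sum =
      ∑ k ∈ Finset.range (b - a).toNat, f (a + (k : Int)) := by
  rw [PySem.List.pyRange_one, List.map_map]
  rfl

-- A's nested range loops, as a nested Finset sum
lemma double_loop (B' G' : Int → Int) (Tn : Nat) :
    (PySem.List.pyRange 0 ((Tn : Int) - 1) 1).foldl (fun count i =>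
      (PySem.List.pyRange (i + 1) (Tn : Int) 1).foldl (fun count j =>
        count + B' i * G' j + B' j * G' i) count) 0 =
    ∑ p ∈ Finset.range Tn, ∑ q ∈ Finset.Ico (p + 1) Tn,
      (B' (p : Int) * G' (q : Int) + B' (q : Int) * G' (p : Int)) := by
  have hinner : ∀ (c i : Int),
      (PySem.List.pyRange (i + 1) (Tn : Int) 1).foldl (fun count j =>
        count + B' i * G' j + B' j * G' i) c =
      c + ((PySem.List.pyRange (i + 1) (Tn : Int) 1).map
            (fun j => B' i * G' j + B' j * G' i)).sum := by
    intro c i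
    have h := PySem.List.foldl_congr_mem
        (l := PySem.List.pyRange (i + 1) (Tn : Int) 1) (init := c)
        (f := fun count j => count + B' i * G' j + B' j * G' i)
        (g := fun count j => count + (B' i * G' j + B' j * G' i))
        (fun acc x _ => by ring)
    rw [h, PySem.List.foldl_add]
  have houter := PySem.List.foldl_congr_mem
      (l := PySem.List.pyRange 0 ((Tn : Int) - 1) 1) (init := (0 : Int))
      (f := fun count i =>
        (PySem.List.pyRange (i + 1) (Tn : Int) 1).foldl (fun count j =>
          count + B' i * G' j + B' j * G' i) count)
      (g := fun count i => count + ((PySem.List.pyRange (i + 1) (Tn : Int) 1).map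
        (fun j => B' i * G' j + B' j * G' i)).sum)
      (fun acc x _ => hinner acc x)
  rw [houter, PySem.List.foldl_add, zero_add, sum_map_pyRange]
  have hTn : (((Tn : Int) - 1) - 0).toNat = Tn - 1 := by omega
  rw [hTn]
  rcases Tn with _ | m
  · simp
  · have hsplit : ∑ p ∈ Finset.range (m + 1), ∑ q ∈ Finset.Ico (p + 1) (m + 1),
        (B' (p : Int) * G' (q : Int) + B' (q : Int) * G' (p : Int)) =
        ∑ p ∈ Finset.range m, ∑ q ∈ Finset.Ico (p + 1) (m + 1),
          (B' (p : Int) * G' (q : Int) + B' (q : Int) * G' (p : Int)) := by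
      rw [Finset.sum_range_succ, Finset.Ico_self, Finset.sum_empty, add_zero]
    rw [hsplit, Nat.add_sub_cancel]
    refine Finset.sum_congr rfl ?_
    intro p hp
    rw [Finset.mem_range] at hp
    rw [sum_map_pyRange, Finset.sum_Ico_eq_sum_range]
    have hlen : (((m + 1 : Nat) : Int) - ((0 + (p : Int)) + 1)).toNat = (m + 1) - (p + 1) := by
      omega
    rw [hlen]
    refine Finset.sum_congr rfl ?_
    intro q hq
    have e2 : (0 : Int) + (p : Int) + 1 + (q : Int) = ((p + 1 + q : Nat) : Int) := by
      push_cast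
      ring
    have e1 : (0 : Int) + (p : Int) = (p : Int) := by ring
    rw [e2, e1]

-- ===== VERDICT (by name: the statement is the Claim_ definition above) =====
theorem count_possible_pairs_spec : Claim_equal_count_possible_pairs := by
  intro pairs _
  unfold Spec_count_possible_pairs
  simp only [count_possible_pairs, count_possible_pairs_alt]
  rw [sort_eq_groupB]
  rw [b_fold (pvGroupB pairs) 0 0 0]
  simp only [zero_add]
  have hnd := nodup_groupB pairs
  have hA := fold_idx
      (fun (st : PySem.Dict Int Int × PySem.Dict Int Int) (idx : Int) (t : List Int) =>
        t.foldl (pvDictStep idx) (st.1.insert idx 0, st.2.insert idx 0))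
      (pvGroupB pairs) hnd (pvGroupB pairs) [] (PySem.Dict.empty, PySem.Dict.empty) rfl
  simp only [List.length_nil, Nat.cast_zero] at hA
  rw [hA, PySem.List.len_eq]
  rw [double_loop]
  have hbg := fun (j : Int) =>
    enum_getD (pvGroupB pairs) 0 PySem.Dict.empty PySem.Dict.empty j
  simp only [Nat.cast_zero, zero_add, Nat.sub_zero] at hbg
  have hsum : ∑ p ∈ Finset.range (pvGroupB pairs).length,
      ∑ q ∈ Finset.Ico (p + 1) (pvGroupB pairs).length,
      (((PySem.List.enumerate (pvGroupB pairs) 0).foldl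
          (fun st p => p.2.foldl (pvDictStep p.1) (st.1.insert p.1 0, st.2.insert p.1 0))
          (PySem.Dict.empty, PySem.Dict.empty)).1.getD (p : Int) 0 *
        ((PySem.List.enumerate (pvGroupB pairs) 0).foldl
          (fun st p => p.2.foldl (pvDictStep p.1) (st.1.insert p.1 0, st.2.insert p.1 0))
          (PySem.Dict.empty, PySem.Dict.empty)).2.getD (q : Int) 0 +
        ((PySem.List.enumerate (pvGroupB pairs) 0).foldl
          (fun st p => p.2.foldl (pvDictStep p.1) (st.1.insert p.1 0, st.2.insert p.1 0))
          (PySem.Dict.empty, PySem.Dict.empty)).1.getD (q : Int) 0 *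
        ((PySem.List.enumerate (pvGroupB pairs) 0).foldl
          (fun st p => p.2.foldl (pvDictStep p.1) (st.1.insert p.1 0, st.2.insert p.1 0))
          (PySem.Dict.empty, PySem.Dict.empty)).2.getD (p : Int) 0) =
      ∑ p ∈ Finset.range (pvGroupB pairs).length,
      ∑ q ∈ Finset.Ico (p + 1) (pvGroupB pairs).length,
      (((pvGroupB pairs).map pvB).getD p 0 * ((pvGroupB pairs).map pvG).getD q 0 +
        ((pvGroupB pairs).map pvB).getD q 0 * ((pvGroupB pairs).map pvG).getD p 0) := by
    refine Finset.sum_congr rfl ?_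
    intro p hp
    rw [Finset.mem_range] at hp
    refine Finset.sum_congr rfl ?_
    intro q hq
    rw [Finset.mem_Ico] at hq
    rw [(hbg (p : Int)).1, (hbg (q : Int)).1, (hbg (p : Int)).2, (hbg (q : Int)).2]
    rw [if_pos (by omega), if_pos (by omega),
      if_pos (by omega), if_pos (by omega)]
    rw [Int.toNat_natCast, Int.toNat_natCast]
  rw [hsum, key_ident]
  have h1 : ∑ p ∈ Finset.range (pvGroupB pairs).length,
      ((pvGroupB pairs).map pvB).getD p 0 = ((pvGroupB pairs).map pvB).sum := by
    have := sum_getD ((pvGroupB pairs).map pvB)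
    rwa [List.length_map] at this
  have h2 : ∑ p ∈ Finset.range (pvGroupB pairs).length,
      ((pvGroupB pairs).map pvG).getD p 0 = ((pvGroupB pairs).map pvG).sum := by
    have := sum_getD ((pvGroupB pairs).map pvG)
    rwa [List.length_map] at this
  have h3 : ∑ p ∈ Finset.range (pvGroupB pairs).length,
      ((pvGroupB pairs).map pvB).getD p 0 * ((pvGroupB pairs).map pvG).getD p 0 =
      ((pvGroupB pairs).map (fun t => pvB t * pvG t)).sum := by
    rw [← sum_getD ((pvGroupB pairs).map (fun t => pvB t * pvG t)), List.length_map]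
    refine Finset.sum_congr rfl ?_
    intro p hp
    rw [Finset.mem_range] at hp
    rw [List.getD_eq_getElem _ _ (by simpa), List.getD_eq_getElem _ _ (by simpa),
      List.getD_eq_getElem _ _ (by simpa)]
    simp
  rw [h1, h2, h3]
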